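-- pv_equiv track=rewrite | github.com/Macacul-accel/CA_Feu | feu05.py | set_final_board
-- ===== SOURCE A (Python) =====
-- def set_final_board(path, maze):
--     o_count = 0
--     with_path = []
--     for id_row, row in enumerate(maze):
--         row = list(row)
--         for id_col, elmt in enumerate(row):
--             if (id_row, id_col) in path and elmt not in ('1', '2'):
--                 row[id_col] ='o'
--                 o_count += 1
--         with_path.append(list(row))
--     return with_path, o_count
-- ===== SOURCE B (Python) =====
-- def set_final_board(path, maze):
--     board = [list(row) for row in maze]
--     o_count = 0
--     for r, c in dict.fromkeys(path):
--         if 0 <= r < len(board) and 0 <= c < len(board[r]) and board[r][c] not in ('1', '2'):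
--             board[r][c] = 'o'
--             o_count += 1
--     return board, o_count
-- ===== Notes on version B (the rewrite author's own statement) =====
-- stated objective: faster
-- what changed: A scans every cell of the maze and tests each (row,col) for membership in the path list; B copies the maze once and drives a single loop over the dict-deduplicated path coordinates, updating only touched cells with a bounds guard.
import Mathlib
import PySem

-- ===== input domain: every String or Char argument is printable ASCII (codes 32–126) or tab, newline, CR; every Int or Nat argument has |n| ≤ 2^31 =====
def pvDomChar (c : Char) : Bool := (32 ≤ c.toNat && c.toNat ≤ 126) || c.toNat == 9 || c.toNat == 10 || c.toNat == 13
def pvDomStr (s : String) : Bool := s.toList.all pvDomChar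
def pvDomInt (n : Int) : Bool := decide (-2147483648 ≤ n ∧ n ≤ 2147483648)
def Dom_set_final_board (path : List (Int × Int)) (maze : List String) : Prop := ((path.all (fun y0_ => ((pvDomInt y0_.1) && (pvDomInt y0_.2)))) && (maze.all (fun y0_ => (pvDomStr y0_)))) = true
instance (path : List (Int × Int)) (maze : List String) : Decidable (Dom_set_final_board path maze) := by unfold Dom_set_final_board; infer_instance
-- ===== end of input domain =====

-- B replaces A's full-grid scan (with a path-membership test at every cell) by a single
-- path-driven loop over the deduplicated path coordinates; objective: alternative algorithm,
-- O(rows*cols*|path|) → O(rows*cols + |path|^2-dedup) work pattern.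

-- ===== PORT A =====
-- list(row): a string becomes a list of one-character strings (shared by both ports, = Python's list(s))
def pvCells (s : String) : List String := s.toList.map (fun c => String.ofList [c])

-- inner loop body of A: for id_col, elmt in enumerate(row): …
def aInner (path : List (Int × Int)) (i : Int) (st2 : List String × Int) (pc : Int × String) : List String × Int :=
  if (i, pc.1) ∈ path ∧ ¬(pc.2 = "1" ∨ pc.2 = "2") then (st2.1.set pc.1.toNat "o", st2.2 + 1) else st2

def set_final_board (path : List (Int × Int)) (maze : List String) : List (List String) × Int :=
  (PySem.List.enumerate maze 0).foldl
    (fun (st : List (List String) × Int) pr =>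
      let row0 := pvCells pr.2
      let inner := (PySem.List.enumerate row0 0).foldl (aInner path pr.1) (row0, st.2)
      (st.1 ++ [inner.1], inner.2))
    ([], 0)

-- ===== PORT B =====
-- loop body of B: for r, c in dict.fromkeys(path): bounds-guarded single-cell update
def bStep (st : List (List String) × Int) (rc : Int × Int) : List (List String) × Int :=
  if 0 ≤ rc.1 ∧ rc.1 < (st.1.length : Int) then
    let row := st.1.getD rc.1.toNat []
    if 0 ≤ rc.2 ∧ rc.2 < (row.length : Int) then
      if ¬(row.getD rc.2.toNat "" = "1" ∨ row.getD rc.2.toNat "" = "2") then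
        (st.1.set rc.1.toNat (row.set rc.2.toNat "o"), st.2 + 1)
      else st
    else st
  else st

def set_final_board_alt (path : List (Int × Int)) (maze : List String) : List (List String) × Int :=
  (PySem.List.dedup path).foldl bStep (maze.map pvCells, 0)

-- ===== PRECONDITION & SPEC =====
def Spec_set_final_board (path : List (Int × Int)) (maze : List String) (out : List (List String) × Int) : Prop := out = set_final_board_alt path maze
instance (path : List (Int × Int)) (maze : List String) (out : List (List String) × Int) : Decidable (Spec_set_final_board path maze out) := by unfold Spec_set_final_board; infer_instance

-- ===== CLAIM (what is proved, stated in full; the proofs are below) =====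
def Claim_equal_set_final_board : Prop := ∀ (path : List (Int × Int)) (maze : List String), Dom_set_final_board path maze → Spec_set_final_board path maze (set_final_board path maze)

-- ===== LEMMAS AND PROOFS =====

-- cell value predicate: elmt not in ('1','2')
abbrev pvOk (v : String) : Prop := ¬(v = "1" ∨ v = "2")

-- canonical description of A's result
def rowSpec (p : List (Int × Int)) (i s : Int) : List String → List String
  | [] => []
  | v :: vs => (if (i, s) ∈ p ∧ pvOk v then "o" else v) :: rowSpec p i (s+1) vs

def rowCnt (p : List (Int × Int)) (i s : Int) : List String → Int
  | [] => 0
  | v :: vs => (if (i, s) ∈ p ∧ pvOk v then 1 else 0) + rowCnt p i (s+1) vs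

def boardSpec (p : List (Int × Int)) (i : Int) : List String → List (List String)
  | [] => []
  | r :: rs => rowSpec p i 0 (pvCells r) :: boardSpec p (i+1) rs

def boardCnt (p : List (Int × Int)) (i : Int) : List String → Int
  | [] => 0
  | r :: rs => rowCnt p i 0 (pvCells r) + boardCnt p (i+1) rs

-- B-side: in-bounds-and-ok condition on a board
def cellB (b : List (List String)) (i j : Nat) : String := (b.getD i []).getD j ""

abbrev inBok (b : List (List String)) (rc : Int × Int) : Prop :=
  0 ≤ rc.1 ∧ rc.1 < (b.length : Int) ∧ 0 ≤ rc.2 ∧ rc.2 < ((b.getD rc.1.toNat []).length : Int) ∧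
    pvOk ((b.getD rc.1.toNat []).getD rc.2.toNat "")

theorem getD_set_eq {α : Type} (l : List α) (r : Nat) (a d : α) (i : Nat) :
    (l.set r a).getD i d = if i = r ∧ r < l.length then a else l.getD i d := by
  by_cases hr : r < l.length
  · by_cases h : i = r
    · simp [List.getD_eq_getElem?_getD, h, hr]
    · simp [List.getD_eq_getElem?_getD, h, hr, Ne.symm h]
  · have hs : l.set r a = l := List.set_eq_of_length_le (by omega)
    simp [hs, hr]

-- ----- A side -----
theorem innerA (p : List (Int × Int)) (i : Int) :
    ∀ (l pre : List String) (n : Int),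
      (PySem.List.enumerate l (pre.length : Int)).foldl (aInner p i) (pre ++ l, n)
        = (pre ++ rowSpec p i (pre.length : Int) l, n + rowCnt p i (pre.length : Int) l) := by
  intro l
  induction l with
  | nil => intro pre n; simp [PySem.List.enumerate_nil, rowSpec, rowCnt]
  | cons v vs ih =>
    intro pre n
    rw [PySem.List.enumerate_cons]
    simp only [List.foldl_cons]
    by_cases hc : (i, (pre.length : Int)) ∈ p ∧ ¬(v = "1" ∨ v = "2")
    · have h1 : aInner p i (pre ++ v :: vs, n) ((pre.length : Int), v)
          = ((pre ++ ["o"]) ++ vs, n + 1) := by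
        simp [aInner, hc]
      have h2 : (pre.length : Int) + 1 = ((pre ++ ["o"]).length : Int) := by simp
      have hcc : (i, (pre.length : Int)) ∈ p ∧ pvOk v := by simpa [pvOk] using hc
      rw [h1, h2, ih (pre ++ ["o"]) (n + 1), ← h2]
      simp only [rowSpec, rowCnt]
      rw [if_pos hcc, if_pos hcc]
      simp only [Prod.mk.injEq, List.append_assoc, List.singleton_append]
      exact ⟨trivial, by omega⟩
    · have h1 : aInner p i (pre ++ v :: vs, n) ((pre.length : Int), v)
          = ((pre ++ [v]) ++ vs, n) := by
        simp only [aInner]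
        rw [if_neg hc]
        simp [List.append_assoc]
      have h2 : (pre.length : Int) + 1 = ((pre ++ [v]).length : Int) := by simp
      have hcc : ¬((i, (pre.length : Int)) ∈ p ∧ pvOk v) := by simpa [pvOk] using hc
      rw [h1, h2, ih (pre ++ [v]) n, ← h2]
      simp only [rowSpec, rowCnt]
      rw [if_neg hcc, if_neg hcc]
      simp only [Prod.mk.injEq, List.append_assoc, List.singleton_append]
      exact ⟨trivial, by omega⟩

theorem outerA (p : List (Int × Int)) :
    ∀ (rows : List String) (i0 : Int) (acc : List (List String)) (n : Int),
      (PySem.List.enumerate rows i0).foldl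
        (fun (st : List (List String) × Int) pr =>
          let row0 := pvCells pr.2
          let inner := (PySem.List.enumerate row0 0).foldl (aInner p pr.1) (row0, st.2)
          (st.1 ++ [inner.1], inner.2)) (acc, n)
        = (acc ++ boardSpec p i0 rows, n + boardCnt p i0 rows) := by
  intro rows
  induction rows with
  | nil => intro i0 acc n; simp [PySem.List.enumerate_nil, boardSpec, boardCnt]
  | cons r rs ih =>
    intro i0 acc n
    rw [PySem.List.enumerate_cons]
    simp only [List.foldl_cons]
    have h0 := innerA p i0 (pvCells r) [] n
    simp only [List.nil_append, List.length_nil, Nat.cast_zero] at h0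
    rw [h0, ih]
    simp only [boardSpec, boardCnt, Prod.mk.injEq, List.append_assoc, List.singleton_append, true_and]
    omega

-- ----- B side -----
theorem bStep_eq (b : List (List String)) (n : Int) (rc : Int × Int) :
    bStep (b, n) rc =
      if inBok b rc then
        (b.set rc.1.toNat ((b.getD rc.1.toNat []).set rc.2.toNat "o"), n + 1)
      else (b, n) := by
  simp only [bStep, inBok, pvOk]
  split_ifs <;> first | rfl | tauto

theorem B_length : ∀ (l : List (Int × Int)) (b : List (List String)) (n : Int),
    ((l.foldl bStep (b, n)).1).length = b.length := by
  intro l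
  induction l with
  | nil => intro b n; rfl
  | cons x xs ih =>
    intro b n
    simp only [List.foldl_cons, bStep_eq]
    split_ifs with h
    · rw [ih]; simp
    · exact ih b n

theorem B_rowlen : ∀ (l : List (Int × Int)) (b : List (List String)) (n : Int) (i : Nat),
    (((l.foldl bStep (b, n)).1).getD i []).length = (b.getD i []).length := by
  intro l
  induction l with
  | nil => intro b n i; rfl
  | cons x xs ih =>
    intro b n i
    simp only [List.foldl_cons, bStep_eq]
    split_ifs with h
    · rw [ih, getD_set_eq]
      split_ifs with h2
      · rw [List.length_set, h2.1]
      · rfl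
    · exact ih b n i

theorem cell_update (b : List (List String)) (x : Int × Int) (k m : Nat)
    (h : ¬(k = x.1.toNat ∧ m = x.2.toNat)) :
    cellB (b.set x.1.toNat ((b.getD x.1.toNat []).set x.2.toNat "o")) k m = cellB b k m := by
  unfold cellB
  rw [getD_set_eq]
  split_ifs with h1
  · rw [h1.1, getD_set_eq]
    split_ifs with h2
    · exact absurd ⟨h1.1, h2.1⟩ h
    · rfl
  · rfl

theorem cell_update_self (b : List (List String)) (x : Int × Int) (hx : inBok b x) :
    cellB (b.set x.1.toNat ((b.getD x.1.toNat []).set x.2.toNat "o")) x.1.toNat x.2.toNat = "o" := by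
  obtain ⟨h1, h2, h3, h4, h5⟩ := hx
  unfold cellB
  rw [getD_set_eq]
  have hb : x.1.toNat < b.length := by omega
  rw [if_pos ⟨rfl, hb⟩, getD_set_eq]
  have hr : x.2.toNat < (b.getD x.1.toNat []).length := by omega
  rw [if_pos ⟨rfl, hr⟩]

theorem inBok_update (b : List (List String)) (x y : Int × Int)
    (hx : inBok b x) (hne : y ≠ x) :
    inBok (b.set x.1.toNat ((b.getD x.1.toNat []).set x.2.toNat "o")) y ↔ inBok b y := by
  obtain ⟨hx1, hx2, hx3, hx4, hx5⟩ := hx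
  have hrow : ∀ k : Nat,
      ((b.set x.1.toNat ((b.getD x.1.toNat []).set x.2.toNat "o")).getD k []).length
        = (b.getD k []).length := by
    intro k
    rw [getD_set_eq]
    split_ifs with h
    · rw [List.length_set, h.1]
    · rfl
  have hne' : ∀ (c1 : 0 ≤ y.1) (c3 : 0 ≤ y.2), ¬(y.1.toNat = x.1.toNat ∧ y.2.toNat = x.2.toNat) := by
    intro c1 c3 ⟨e1, e2⟩
    apply hne
    have q1 : y.1 = x.1 := by omega
    have q2 : y.2 = x.2 := by omega
    exact Prod.ext_iff.mpr ⟨q1, q2⟩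
  constructor
  · rintro ⟨c1, c2, c3, c4, c5⟩
    rw [List.length_set] at c2
    rw [hrow] at c4
    have hc := cell_update b x y.1.toNat y.2.toNat (hne' c1 c3)
    unfold cellB at hc
    rw [hc] at c5
    exact ⟨c1, c2, c3, c4, c5⟩
  · rintro ⟨c1, c2, c3, c4, c5⟩
    have hc := cell_update b x y.1.toNat y.2.toNat (hne' c1 c3)
    unfold cellB at hc
    refine ⟨c1, by simpa using c2, c3, by rwa [hrow], by rwa [hc]⟩

theorem B_cell : ∀ (l : List (Int × Int)), l.Nodup → ∀ (b : List (List String)) (n : Int) (i j : Nat),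
    cellB ((l.foldl bStep (b, n)).1) i j
      = if ((i : Int), (j : Int)) ∈ l ∧ inBok b ((i : Int), (j : Int)) then "o" else cellB b i j := by
  intro l
  induction l with
  | nil => intro _ b n i j; simp
  | cons x xs ih =>
    intro hnd b n i j
    obtain ⟨hxm, hnd'⟩ := List.nodup_cons.mp hnd
    simp only [List.foldl_cons, bStep_eq]
    by_cases h : inBok b x
    · rw [if_pos h, ih hnd']
      set b2 := b.set x.1.toNat ((b.getD x.1.toNat []).set x.2.toNat "o") with hb2
      by_cases hxy : ((i : Int), (j : Int)) = x
      · have hi : x.1.toNat = i := by rw [← hxy]; simp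
        have hj : x.2.toNat = j := by rw [← hxy]; simp
        have hmem : ¬(((i : Int), (j : Int)) ∈ xs) := by rw [hxy]; exact hxm
        have hLc : ¬(((i : Int), (j : Int)) ∈ xs ∧ inBok b2 ((i : Int), (j : Int))) :=
          fun hh => hmem hh.1
        have hRc : (((i : Int), (j : Int)) ∈ x :: xs ∧ inBok b ((i : Int), (j : Int))) :=
          ⟨by rw [hxy]; exact List.mem_cons_self, by rw [hxy]; exact h⟩
        rw [if_neg hLc, if_pos hRc, ← hi, ← hj]
        exact cell_update_self b x h
      · have hupd := inBok_update b x ((i : Int), (j : Int)) h hxy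
        have hcellne : ¬(i = x.1.toNat ∧ j = x.2.toNat) := by
          rintro ⟨e1, e2⟩
          apply hxy
          obtain ⟨q1, _, q3, _⟩ := h
          refine Prod.ext_iff.mpr ⟨by simp; omega, by simp; omega⟩
        have hcell := cell_update b x i j hcellne
        by_cases hcond : (((i : Int), (j : Int)) ∈ xs ∧ inBok b ((i : Int), (j : Int)))
        · have hL : (((i : Int), (j : Int)) ∈ xs ∧ inBok b2 ((i : Int), (j : Int))) :=
            ⟨hcond.1, hupd.mpr hcond.2⟩
          have hR : (((i : Int), (j : Int)) ∈ x :: xs ∧ inBok b ((i : Int), (j : Int))) :=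
            ⟨List.mem_cons_of_mem _ hcond.1, hcond.2⟩
          rw [if_pos hL, if_pos hR]
        · have hL : ¬(((i : Int), (j : Int)) ∈ xs ∧ inBok b2 ((i : Int), (j : Int))) :=
            fun hh => hcond ⟨hh.1, hupd.mp hh.2⟩
          have hR : ¬(((i : Int), (j : Int)) ∈ x :: xs ∧ inBok b ((i : Int), (j : Int))) :=
            fun hh => hcond ⟨(List.mem_cons.mp hh.1).resolve_left hxy, hh.2⟩
          rw [if_neg hL, if_neg hR]
          exact hcell
    · rw [if_neg h, ih hnd']
      by_cases hxy : ((i : Int), (j : Int)) = x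
      · have hnb : ¬ inBok b ((i : Int), (j : Int)) := by rw [hxy]; exact h
        have h1 : ¬(((i : Int), (j : Int)) ∈ xs ∧ inBok b ((i : Int), (j : Int))) :=
          fun hh => hnb hh.2
        have h2 : ¬(((i : Int), (j : Int)) ∈ x :: xs ∧ inBok b ((i : Int), (j : Int))) :=
          fun hh => hnb hh.2
        rw [if_neg h1, if_neg h2]
      · by_cases hcond : (((i : Int), (j : Int)) ∈ xs ∧ inBok b ((i : Int), (j : Int)))
        · rw [if_pos hcond, if_pos ⟨List.mem_cons_of_mem _ hcond.1, hcond.2⟩]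
        · have h2 : ¬(((i : Int), (j : Int)) ∈ x :: xs ∧ inBok b ((i : Int), (j : Int))) :=
            fun hh => hcond ⟨(List.mem_cons.mp hh.1).resolve_left hxy, hh.2⟩
          rw [if_neg hcond, if_neg h2]

theorem B_cnt : ∀ (l : List (Int × Int)), l.Nodup → ∀ (b : List (List String)) (n : Int),
    (l.foldl bStep (b, n)).2 = n + ((l.filter (fun rc => decide (inBok b rc))).length : Int) := by
  intro l
  induction l with
  | nil => intro _ b n; simp
  | cons x xs ih =>
    intro hnd b n
    obtain ⟨hxm, hnd'⟩ := List.nodup_cons.mp hnd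
    simp only [List.foldl_cons, bStep_eq]
    split_ifs with h
    · rw [ih hnd']
      have hfc : xs.filter (fun rc => decide (inBok (b.set x.1.toNat ((b.getD x.1.toNat []).set x.2.toNat "o")) rc))
          = xs.filter (fun rc => decide (inBok b rc)) := by
        apply List.filter_congr
        intro y hy
        have hne : y ≠ x := fun e => hxm (e ▸ hy)
        simp only [decide_eq_decide]
        exact inBok_update b x y h hne
      rw [hfc, List.filter_cons, if_pos (decide_eq_true h), List.length_cons]
      push_cast
      omega
    · rw [ih hnd', List.filter_cons, if_neg (fun hq => h (of_decide_eq_true hq))]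

-- ----- counting bridge -----
theorem rowCnt_congr (p q : List (Int × Int)) (h : ∀ rc, rc ∈ p ↔ rc ∈ q) (i : Int) :
    ∀ (l : List String) (s : Int), rowCnt p i s l = rowCnt q i s l := by
  intro l
  induction l with
  | nil => intro s; simp [rowCnt]
  | cons v vs ih => intro s; simp [rowCnt, ih, h]

theorem boardCnt_congr (p q : List (Int × Int)) (h : ∀ rc, rc ∈ p ↔ rc ∈ q) :
    ∀ (rows : List String) (i : Int), boardCnt p i rows = boardCnt q i rows := by
  intro rows
  induction rows with
  | nil => intro i; simp [boardCnt]
  | cons r rs ih => intro i; simp [boardCnt, rowCnt_congr p q h, ih]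

theorem rowCnt_nil (i : Int) : ∀ (l : List String) (s : Int), rowCnt [] i s l = 0 := by
  intro l
  induction l with
  | nil => intro s; simp [rowCnt]
  | cons v vs ih => intro s; simp [rowCnt, ih]

theorem boardCnt_nil : ∀ (rows : List String) (i : Int), boardCnt [] i rows = 0 := by
  intro rows
  induction rows with
  | nil => intro i; simp [boardCnt]
  | cons r rs ih => intro i; simp [boardCnt, rowCnt_nil, ih]

theorem rowCnt_cons (x : Int × Int) (xs : List (Int × Int)) (hx : x ∉ xs) (i : Int) :
    ∀ (l : List String) (s : Int),
      rowCnt (x :: xs) i s l = rowCnt xs i s l +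
        (if x.1 = i ∧ s ≤ x.2 ∧ x.2 < s + l.length ∧ pvOk (l.getD (x.2 - s).toNat "") then 1 else 0) := by
  obtain ⟨xr, xc⟩ := x
  intro l
  induction l with
  | nil =>
    intro s
    simp only [rowCnt, List.length_nil]
    split_ifs with hcond
    · obtain ⟨-, h2, h3, -⟩ := hcond
      exfalso
      simp only [Nat.cast_zero, add_zero] at h3
      omega
    · simp
  | cons v vs ihl =>
    intro s
    show (if ((i, s) ∈ (xr, xc) :: xs ∧ pvOk v) then (1:Int) else 0) + rowCnt ((xr, xc) :: xs) i (s+1) vs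
        = ((if ((i, s) ∈ xs ∧ pvOk v) then (1:Int) else 0) + rowCnt xs i (s+1) vs) +
          (if (xr = i ∧ s ≤ xc ∧ xc < s + ((vs.length : Int) + 1) ∧
              pvOk ((v :: vs).getD (xc - s).toNat "")) then (1:Int) else 0)
    rw [ihl (s+1)]
    have hH : (if ((i, s) ∈ (xr, xc) :: xs ∧ pvOk v) then (1:Int) else 0)
        = (if ((i, s) ∈ xs ∧ pvOk v) then (1:Int) else 0)
          + (if ((i, s) = (xr, xc) ∧ pvOk v) then (1:Int) else 0) := by
      by_cases h1 : (i, s) = (xr, xc)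
      · have h2 : ¬((i, s) ∈ xs) := by rw [h1]; exact hx
        by_cases h3 : pvOk v <;> simp [h1, h3, hx]
      · have h2 : ((i, s) ∈ (xr, xc) :: xs) ↔ ((i, s) ∈ xs) := by
          constructor
          · intro hm
            rcases List.mem_cons.mp hm with he | hm'
            · exact absurd he h1
            · exact hm'
          · exact List.mem_cons_of_mem _
        by_cases h3 : pvOk v <;> simp [h2, h1, h3]
    have hT : (if (xr = i ∧ s ≤ xc ∧ xc < s + ((vs.length : Int) + 1) ∧
            pvOk ((v :: vs).getD (xc - s).toNat "")) then (1:Int) else 0)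
        = (if (xr = i ∧ s + 1 ≤ xc ∧ xc < s + 1 + (vs.length : Int) ∧
            pvOk (vs.getD (xc - (s + 1)).toNat "")) then (1:Int) else 0)
          + (if ((i, s) = (xr, xc) ∧ pvOk v) then (1:Int) else 0) := by
      by_cases h1 : (i, s) = (xr, xc)
      · have e1 : xr = i := by rw [Prod.ext_iff] at h1; exact h1.1.symm
        have e2 : xc = s := by rw [Prod.ext_iff] at h1; exact h1.2.symm
        subst e1; subst e2
        have hC2 : ¬(xr = xr ∧ xc + 1 ≤ xc ∧ xc < xc + 1 + (vs.length : Int) ∧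
            pvOk (vs.getD (xc - (xc + 1)).toNat "")) := by
          rintro ⟨-, h, -, -⟩; omega
        have hgv : ((v :: vs).getD (xc - xc).toNat "") = v := by simp
        rw [if_neg hC2]
        by_cases h3 : pvOk v
        · rw [if_pos ⟨rfl, le_refl xc, by omega, by rw [hgv]; exact h3⟩, if_pos ⟨rfl, h3⟩]
          ring
        · rw [if_neg (fun hq => h3 (by rw [← hgv]; exact hq.2.2.2)),
            if_neg (fun hq => h3 hq.2)]
          ring
      · have h3 : ¬((i, s) = (xr, xc) ∧ pvOk v) := fun hq => h1 hq.1
        rw [if_neg h3, add_zero]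
        by_cases hri : xr = i
        · subst hri
          have hxc : xc ≠ s := fun e => h1 (by rw [e])
          by_cases hr2 : s + 1 ≤ xc ∧ xc < s + 1 + (vs.length : Int)
          · have hn : (xc - s).toNat = (xc - (s + 1)).toNat + 1 := by omega
            have hg : ((v :: vs).getD (xc - s).toNat "") = vs.getD (xc - (s + 1)).toNat "" := by
              rw [hn]; simp
            by_cases hok : pvOk (vs.getD (xc - (s + 1)).toNat "")
            · rw [if_pos ⟨rfl, by omega, by omega, by rw [hg]; exact hok⟩,
                if_pos ⟨rfl, hr2.1, hr2.2, hok⟩]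
            · rw [if_neg (fun hq => hok (by rw [← hg]; exact hq.2.2.2)),
                if_neg (fun hq => hok hq.2.2.2)]
          · have hn1 : ¬(xr = xr ∧ s ≤ xc ∧ xc < s + ((vs.length : Int) + 1) ∧
                pvOk ((v :: vs).getD (xc - s).toNat "")) := by
              rintro ⟨-, h2a, h2b, -⟩
              exact hr2 ⟨by omega, by omega⟩
            have hn2 : ¬(xr = xr ∧ s + 1 ≤ xc ∧ xc < s + 1 + (vs.length : Int) ∧
                pvOk (vs.getD (xc - (s + 1)).toNat "")) := by
              rintro ⟨-, h2a, h2b, -⟩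
              exact hr2 ⟨h2a, h2b⟩
            rw [if_neg hn1, if_neg hn2]
        · rw [if_neg (fun hq => hri hq.1), if_neg (fun hq => hri hq.1)]
    rw [hH, hT]
    ring

theorem boardCnt_cons (x : Int × Int) (xs : List (Int × Int)) (hx : x ∉ xs) :
    ∀ (rows : List String) (i0 : Int),
      boardCnt (x :: xs) i0 rows = boardCnt xs i0 rows +
        (if i0 ≤ x.1 ∧ x.1 < i0 + rows.length ∧ 0 ≤ x.2 ∧
            x.2 < (pvCells (rows.getD (x.1 - i0).toNat "")).length ∧
            pvOk ((pvCells (rows.getD (x.1 - i0).toNat "")).getD x.2.toNat "") then 1 else 0) := by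
  obtain ⟨xr, xc⟩ := x
  intro rows
  induction rows with
  | nil =>
    intro i0
    simp only [boardCnt, List.length_nil]
    split_ifs with hcond
    · obtain ⟨h1, h2, -⟩ := hcond
      exfalso
      simp only [Nat.cast_zero, add_zero] at h2
      omega
    · simp
  | cons r rs ih =>
    intro i0
    show rowCnt ((xr, xc) :: xs) i0 0 (pvCells r) + boardCnt ((xr, xc) :: xs) (i0 + 1) rs
        = (rowCnt xs i0 0 (pvCells r) + boardCnt xs (i0 + 1) rs) +
          (if (i0 ≤ xr ∧ xr < i0 + ((rs.length : Int) + 1) ∧ 0 ≤ xc ∧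
              xc < ((pvCells ((r :: rs).getD (xr - i0).toNat "")).length : Int) ∧
              pvOk ((pvCells ((r :: rs).getD (xr - i0).toNat "")).getD xc.toNat "")) then (1:Int) else 0)
    rw [rowCnt_cons (xr, xc) xs hx i0 (pvCells r) 0, ih (i0 + 1)]
    have hx0 : xc - 0 = xc := by ring
    have hsplit : (if (i0 ≤ xr ∧ xr < i0 + ((rs.length : Int) + 1) ∧ 0 ≤ xc ∧
              xc < ((pvCells ((r :: rs).getD (xr - i0).toNat "")).length : Int) ∧
              pvOk ((pvCells ((r :: rs).getD (xr - i0).toNat "")).getD xc.toNat "")) then (1:Int) else 0)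
        = (if (xr = i0 ∧ 0 ≤ xc ∧ xc < 0 + ((pvCells r).length : Int) ∧
              pvOk ((pvCells r).getD (xc - 0).toNat "")) then (1:Int) else 0)
          + (if (i0 + 1 ≤ xr ∧ xr < i0 + 1 + (rs.length : Int) ∧ 0 ≤ xc ∧
              xc < ((pvCells (rs.getD (xr - (i0 + 1)).toNat "")).length : Int) ∧
              pvOk ((pvCells (rs.getD (xr - (i0 + 1)).toNat "")).getD xc.toNat "")) then (1:Int) else 0) := by
      by_cases h1 : xr = i0
      · have hg : ((r :: rs).getD (xr - i0).toNat "") = r := by rw [h1]; simp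
        have hB : ¬(i0 + 1 ≤ xr ∧ xr < i0 + 1 + (rs.length : Int) ∧ 0 ≤ xc ∧
            xc < ((pvCells (rs.getD (xr - (i0 + 1)).toNat "")).length : Int) ∧
            pvOk ((pvCells (rs.getD (xr - (i0 + 1)).toNat "")).getD xc.toNat "")) := by
          rintro ⟨h, -⟩; omega
        rw [if_neg hB, add_zero]
        by_cases hA : (0 ≤ xc ∧ xc < ((pvCells r).length : Int) ∧ pvOk ((pvCells r).getD xc.toNat ""))
        · rw [if_pos ⟨by omega, by omega, hA.1, by rw [hg]; exact hA.2.1, by rw [hg]; exact hA.2.2⟩,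
            if_pos ⟨h1, hA.1, by rw [zero_add]; exact hA.2.1, by rw [hx0]; exact hA.2.2⟩]
        · rw [if_neg (fun hq => hA ⟨hq.2.2.1, by rw [← hg]; exact hq.2.2.2.1,
              by rw [← hg]; exact hq.2.2.2.2⟩),
            if_neg (fun hq => hA ⟨hq.2.1, by rw [← zero_add ((pvCells r).length : Int)]; exact hq.2.2.1,
              by rw [← hx0]; exact hq.2.2.2⟩)]
      · have hAn : ¬(xr = i0 ∧ 0 ≤ xc ∧ xc < 0 + ((pvCells r).length : Int) ∧
            pvOk ((pvCells r).getD (xc - 0).toNat "")) := fun hq => h1 hq.1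
        rw [if_neg hAn, zero_add]
        by_cases h2 : i0 + 1 ≤ xr ∧ xr < i0 + 1 + (rs.length : Int)
        · have hn : (xr - i0).toNat = (xr - (i0 + 1)).toNat + 1 := by omega
          have hg : ((r :: rs).getD (xr - i0).toNat "") = rs.getD (xr - (i0 + 1)).toNat "" := by
            rw [hn]; simp
          by_cases hrest : (0 ≤ xc ∧ xc < ((pvCells (rs.getD (xr - (i0 + 1)).toNat "")).length : Int) ∧
              pvOk ((pvCells (rs.getD (xr - (i0 + 1)).toNat "")).getD xc.toNat ""))
          · rw [if_pos ⟨by omega, by omega, hrest.1, by rw [hg]; exact hrest.2.1,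
                by rw [hg]; exact hrest.2.2⟩,
              if_pos ⟨h2.1, h2.2, hrest.1, hrest.2.1, hrest.2.2⟩]
          · rw [if_neg (fun hq => hrest ⟨hq.2.2.1, by rw [← hg]; exact hq.2.2.2.1,
                by rw [← hg]; exact hq.2.2.2.2⟩),
              if_neg (fun hq => hrest ⟨hq.2.2.1, hq.2.2.2.1, hq.2.2.2.2⟩)]
        · rw [if_neg (by rintro ⟨q1, q2, -⟩; exact h2 ⟨by omega, by omega⟩),
            if_neg (fun hq => h2 ⟨hq.1, hq.2.1⟩)]
    rw [hsplit]
    ring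

theorem getD_map_pvCells (maze : List String) (k : Nat) :
    ((maze.map pvCells).getD k []) = pvCells (maze.getD k "") := by
  by_cases hk : k < maze.length
  · simp [List.getD_eq_getElem?_getD, List.getElem?_eq_getElem hk]
  · have h1 : maze.length ≤ k := by omega
    rw [List.getD_eq_getElem?_getD, List.getD_eq_getElem?_getD,
      List.getElem?_eq_none (by simpa using h1), List.getElem?_eq_none (by simpa using h1)]
    simp [pvCells]

theorem cnt_of_nodup (maze : List String) :
    ∀ (l : List (Int × Int)), l.Nodup →
      boardCnt l 0 maze = ((l.filter (fun rc => decide (inBok (maze.map pvCells) rc))).length : Int) := by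
  intro l
  induction l with
  | nil => intro _; simp [boardCnt_nil]
  | cons x xs ih =>
    intro hnd
    obtain ⟨hxm, hnd'⟩ := List.nodup_cons.mp hnd
    rw [boardCnt_cons x xs hxm maze 0, ih hnd']
    have hiff : (0 ≤ x.1 ∧ x.1 < 0 + (maze.length : Int) ∧ 0 ≤ x.2 ∧
        x.2 < ((pvCells (maze.getD (x.1 - 0).toNat "")).length : Int) ∧
        pvOk ((pvCells (maze.getD (x.1 - 0).toNat "")).getD x.2.toNat ""))
        ↔ inBok (maze.map pvCells) x := by
      unfold inBok
      rw [getD_map_pvCells maze x.1.toNat]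
      have h0 : x.1 - 0 = x.1 := by ring
      rw [h0]
      simp only [List.length_map]
      constructor
      · rintro ⟨a, b, c, d, e⟩; exact ⟨a, by omega, c, d, e⟩
      · rintro ⟨a, b, c, d, e⟩; exact ⟨a, by omega, c, d, e⟩
    rw [List.filter_cons]
    by_cases hc : inBok (maze.map pvCells) x
    · rw [if_pos (hiff.mpr hc), if_pos (decide_eq_true hc), List.length_cons]
      push_cast
      ring
    · rw [if_neg (fun hq => hc (hiff.mp hq)), if_neg (fun hq => hc (of_decide_eq_true hq))]
      ring

-- ----- board bridge -----
theorem length_rowSpec (p : List (Int × Int)) (i : Int) :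
    ∀ (l : List String) (s : Int), (rowSpec p i s l).length = l.length := by
  intro l
  induction l with
  | nil => intro s; simp [rowSpec]
  | cons v vs ih => intro s; simp [rowSpec, ih]

theorem length_boardSpec (p : List (Int × Int)) :
    ∀ (rows : List String) (i : Int), (boardSpec p i rows).length = rows.length := by
  intro rows
  induction rows with
  | nil => intro i; simp [boardSpec]
  | cons r rs ih => intro i; simp [boardSpec, ih]

theorem rowSpec_getD (p : List (Int × Int)) (i : Int) :
    ∀ (l : List String) (s : Int) (j : Nat), j < l.length →
      (rowSpec p i s l).getD j "" =
        if (i, s + j) ∈ p ∧ pvOk (l.getD j "") then "o" else l.getD j "" := by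
  intro l
  induction l with
  | nil => intro s j hj; simp at hj
  | cons v vs ih =>
    intro s j hj
    cases j with
    | zero => simp [rowSpec]
    | succ k =>
      have := ih (s+1) k (by simpa using hj)
      simp only [rowSpec, List.getD_cons_succ]
      rw [this]
      have : s + 1 + (k : Int) = s + ((k : Nat) + 1 : Nat) := by push_cast; ring
      rw [this]

theorem boardSpec_getD (p : List (Int × Int)) :
    ∀ (rows : List String) (i0 : Int) (k : Nat), k < rows.length →
      (boardSpec p i0 rows).getD k [] = rowSpec p (i0 + k) 0 (pvCells (rows.getD k "")) := by
  intro rows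
  induction rows with
  | nil => intro i0 k hk; simp at hk
  | cons r rs ih =>
    intro i0 k hk
    cases k with
    | zero => simp [boardSpec]
    | succ m =>
      have := ih (i0+1) m (by simpa using hk)
      simp only [boardSpec, List.getD_cons_succ]
      rw [this]
      have : i0 + 1 + (m : Int) = i0 + ((m : Nat) + 1 : Nat) := by push_cast; ring
      rw [this]

-- ===== VERDICT (by name: the statement is the Claim_ definition above) =====
theorem set_final_board_spec : Claim_equal_set_final_board := by
  unfold Claim_equal_set_final_board
  intro path maze _
  unfold Spec_set_final_board
  have hA : set_final_board path maze = (boardSpec path 0 maze, boardCnt path 0 maze) := by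
    unfold set_final_board
    simpa using outerA path maze 0 [] 0
  rw [hA]
  unfold set_final_board_alt
  have hnd : (PySem.List.dedup path).Nodup := PySem.List.nodup_dedup path
  have hmem : ∀ rc : Int × Int, rc ∈ path ↔ rc ∈ PySem.List.dedup path :=
    fun rc => (PySem.List.mem_dedup path rc).symm
  have hcnt : boardCnt path 0 maze
      = ((PySem.List.dedup path).foldl bStep (maze.map pvCells, 0)).2 := by
    rw [B_cnt _ hnd, boardCnt_congr path _ hmem maze 0, cnt_of_nodup maze _ hnd, zero_add]
  have hboard : boardSpec path 0 maze
      = ((PySem.List.dedup path).foldl bStep (maze.map pvCells, 0)).1 := by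
    apply List.ext_getElem
    · rw [length_boardSpec, B_length]
      simp
    · intro k hk1 hk2
      have hkm : k < maze.length := by
        rw [length_boardSpec] at hk1
        exact hk1
      have hrowA : (boardSpec path 0 maze)[k]
          = rowSpec path (0 + (k : Int)) 0 (pvCells (maze.getD k "")) := by
        rw [← List.getD_eq_getElem (boardSpec path 0 maze) [] hk1]
        exact boardSpec_getD path maze 0 k hkm
      have hlenB : (((PySem.List.dedup path).foldl bStep (maze.map pvCells, 0)).1.getD k []).length
          = (pvCells (maze.getD k "")).length := by
        rw [B_rowlen, getD_map_pvCells]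
      apply List.ext_getElem
      · rw [hrowA, length_rowSpec]
        rw [← List.getD_eq_getElem _ [] hk2, hlenB]
      · intro j hj1 hj2
        have hjc : j < (pvCells (maze.getD k "")).length := by
          rw [hrowA, length_rowSpec] at hj1
          exact hj1
        have hLHS : (boardSpec path 0 maze)[k][j]
            = if ((0 + (k : Int)), 0 + (j : Int)) ∈ path ∧
                pvOk ((pvCells (maze.getD k "")).getD j "") then "o"
              else (pvCells (maze.getD k "")).getD j "" := by
          rw [← List.getD_eq_getElem _ "" hj1]
          conv_lhs => rw [hrowA]
          exact rowSpec_getD path (0 + (k : Int)) (pvCells (maze.getD k "")) 0 j hjc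
        have hcell0 : cellB (maze.map pvCells) k j = (pvCells (maze.getD k "")).getD j "" := by
          unfold cellB
          rw [getD_map_pvCells]
        have hin : inBok (maze.map pvCells) ((k : Int), (j : Int))
            ↔ pvOk ((pvCells (maze.getD k "")).getD j "") := by
          unfold inBok
          simp only [Int.toNat_natCast, List.length_map, getD_map_pvCells]
          constructor
          · rintro ⟨-, -, -, -, e⟩; exact e
          · intro e
            exact ⟨by omega, by omega, by omega, by omega, e⟩
        have hRHS : ((PySem.List.dedup path).foldl bStep (maze.map pvCells, 0)).1[k][j]
            = if ((k : Int), (j : Int)) ∈ PySem.List.dedup path ∧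
                inBok (maze.map pvCells) ((k : Int), (j : Int)) then "o"
              else cellB (maze.map pvCells) k j := by
          rw [← List.getD_eq_getElem _ "" hj2]
          conv_lhs => rw [← List.getD_eq_getElem _ [] hk2]
          exact B_cell (PySem.List.dedup path) hnd (maze.map pvCells) 0 k j
        rw [hLHS, hRHS, hcell0]
        by_cases hc : (((k : Int), (j : Int)) ∈ path ∧ pvOk ((pvCells (maze.getD k "")).getD j ""))
        · rw [if_pos ⟨by rw [zero_add, zero_add]; exact hc.1, hc.2⟩,
            if_pos ⟨(hmem _).mp hc.1, hin.mpr hc.2⟩]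
        · rw [if_neg (fun hq => hc ⟨by rw [← zero_add ((k:Int)), ← zero_add ((j:Int))]; exact hq.1, hq.2⟩),
            if_neg (fun hq => hc ⟨(hmem _).mpr hq.1, hin.mp hq.2⟩)]
  rw [Prod.ext_iff]
  exact ⟨hboard, hcnt⟩
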